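-- pv_equiv track=rewrite | github.com/hambonesoftware/MIND | backend/mind_api/mind_core/theory/voicing.py | voice_chord_moonlight
-- ===== SOURCE A (Python) =====
-- from typing import List
--
-- def voice_chord_moonlight(pitch_classes_ordered: List[int]) -> List[int]:
--     voiced: List[int] = []
--     target_bases = [56, 61, 64, 67]
--     for idx, pc in enumerate(pitch_classes_ordered[:4]):
--         base = target_bases[min(idx, len(target_bases) - 1)]
--         while base % 12 != pc:
--             base += 1
--         while base > 68:
--             base -= 12
--         voiced.append(base)
--     return voiced
-- ===== SOURCE B (Python) =====
-- def voice_chord_moonlight(pitch_classes_ordered):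
--     def place(base, pc):
--         aligned = base + (pc - base) % 12
--         return aligned - 12 if aligned > 68 else aligned
--     return [place(base, pc) for base, pc in zip([56, 61, 64, 67], pitch_classes_ordered)]
-- ===== Notes on version B (the rewrite author's own statement) =====
-- stated objective: idiomatic
-- what changed: Replaces the two inner while-loops (linear search upward to the pitch class, then repeated subtraction below 69) by a constant-time modular formula, and replaces the slice+enumerate+min-index loop by a zip against the base list (zip truncates to 4 elements itself).
import Mathlib
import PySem

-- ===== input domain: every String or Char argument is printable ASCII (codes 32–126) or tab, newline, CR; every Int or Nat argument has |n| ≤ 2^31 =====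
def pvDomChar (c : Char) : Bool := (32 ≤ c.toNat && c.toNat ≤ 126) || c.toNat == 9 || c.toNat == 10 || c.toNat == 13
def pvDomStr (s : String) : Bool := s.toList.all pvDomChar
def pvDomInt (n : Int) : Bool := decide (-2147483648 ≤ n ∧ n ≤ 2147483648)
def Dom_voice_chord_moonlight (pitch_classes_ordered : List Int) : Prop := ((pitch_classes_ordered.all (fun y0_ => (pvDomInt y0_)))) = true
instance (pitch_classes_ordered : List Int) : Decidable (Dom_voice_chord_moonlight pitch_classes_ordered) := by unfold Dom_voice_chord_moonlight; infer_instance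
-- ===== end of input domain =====

-- B replaces A's two inner while-loops with a constant-time modular formula and the
-- slice/enumerate/min-index loop with a zip against the base list (objective: idiomatic).


-- ===== PORT A =====
-- while base % 12 != pc: base += 1  — fuel 12 suffices on Pre_ (0 ≤ pc < 12 needs ≤ 11 steps);
-- outside Pre_ the Python loop never terminates, so nothing is claimed there.
def vcmAlignLoop (pc : Int) (base : Int) : Nat → Int
  | 0 => base
  | n + 1 => if PySem.Int.mod base 12 ≠ pc then vcmAlignLoop pc (base + 1) n else base

-- while base > 68: base -= 12  — on Pre_ the aligned base is ≤ 78, one step suffices; fuel 12 is ample.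
def vcmReduceLoop (base : Int) : Nat → Int
  | 0 => base
  | n + 1 => if base > 68 then vcmReduceLoop (base - 12) n else base

def voice_chord_moonlight (pitch_classes_ordered : List Int) : List Int :=
  let target_bases : List Int := [56, 61, 64, 67]
  (PySem.List.enumerate (PySem.List.slice pitch_classes_ordered none (some 4))).foldl
    (fun voiced p =>
      let base := PySem.List.pyGetD target_bases (min p.1 ((target_bases.length : Int) - 1)) 0
      let base := vcmAlignLoop p.2 base 12
      let base := vcmReduceLoop base 12
      voiced ++ [base]) []

-- ===== PORT B =====
def vcmPlace (base pc : Int) : Int :=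
  let aligned := base + PySem.Int.mod (pc - base) 12
  if aligned > 68 then aligned - 12 else aligned

def voice_chord_moonlight_alt (pitch_classes_ordered : List Int) : List Int :=
  List.zipWith vcmPlace [56, 61, 64, 67] pitch_classes_ordered

-- ===== PRECONDITION & SPEC =====
-- A's first while-loop diverges whenever one of the first four entries is not a valid
-- pitch class (outside 0..11); Pre_ admits exactly the inputs on which A returns.
def Pre_voice_chord_moonlight (pitch_classes_ordered : List Int) : Prop :=
  ∀ pc ∈ pitch_classes_ordered.take 4, 0 ≤ pc ∧ pc < 12
instance (pitch_classes_ordered : List Int) : Decidable (Pre_voice_chord_moonlight pitch_classes_ordered) := by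
  unfold Pre_voice_chord_moonlight; infer_instance

def pvWitness_voice_chord_moonlight : List Int := [0, 4, 7, 11, 3]

def Spec_voice_chord_moonlight (pitch_classes_ordered : List Int) (out : List Int) : Prop := out = voice_chord_moonlight_alt pitch_classes_ordered
instance (pitch_classes_ordered : List Int) (out : List Int) : Decidable (Spec_voice_chord_moonlight pitch_classes_ordered out) := by unfold Spec_voice_chord_moonlight; infer_instance

-- ===== CLAIM (what is proved, stated in full; the proofs are below) =====
def Claim_equal_voice_chord_moonlight : Prop := ∀ (pitch_classes_ordered : List Int), Dom_voice_chord_moonlight pitch_classes_ordered → Pre_voice_chord_moonlight pitch_classes_ordered → Spec_voice_chord_moonlight pitch_classes_ordered (voice_chord_moonlight pitch_classes_ordered)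

-- ===== LEMMAS AND PROOFS =====

-- per-element agreement for each of the four concrete bases and a valid pitch class
lemma vcm_step_eq (base pc : Int)
    (hb : base = 56 ∨ base = 61 ∨ base = 64 ∨ base = 67)
    (h0 : 0 ≤ pc) (h1 : pc < 12) :
    vcmReduceLoop (vcmAlignLoop pc base 12) 12 = vcmPlace base pc := by
  rcases hb with h | h | h | h <;> subst h <;> interval_cases pc <;> decide

-- ===== VERDICT (by name: the statement is the Claim_ definition above) =====
theorem voice_chord_moonlight_spec : Claim_equal_voice_chord_moonlight := by
  intro xs _ hpre
  unfold Spec_voice_chord_moonlight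
  match xs with
  | [] => decide
  | [a] =>
    have ha := hpre a (by simp)
    simp [voice_chord_moonlight, voice_chord_moonlight_alt, PySem.List.slice_to,
      PySem.List.enumerate, PySem.List.pyGetD,
      vcm_step_eq 56 a (by tauto) ha.1 ha.2]
  | [a, b] =>
    have ha := hpre a (by simp)
    have hb := hpre b (by simp)
    simp [voice_chord_moonlight, voice_chord_moonlight_alt, PySem.List.slice_to,
      PySem.List.enumerate, PySem.List.pyGetD,
      vcm_step_eq 56 a (by tauto) ha.1 ha.2,
      vcm_step_eq 61 b (by tauto) hb.1 hb.2]
  | [a, b, c] =>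
    have ha := hpre a (by simp)
    have hb := hpre b (by simp)
    have hc := hpre c (by simp)
    simp [voice_chord_moonlight, voice_chord_moonlight_alt, PySem.List.slice_to,
      PySem.List.enumerate, PySem.List.pyGetD,
      vcm_step_eq 56 a (by tauto) ha.1 ha.2,
      vcm_step_eq 61 b (by tauto) hb.1 hb.2,
      vcm_step_eq 64 c (by tauto) hc.1 hc.2]
  | a :: b :: c :: d :: rest =>
    have ha := hpre a (by simp [List.take])
    have hb := hpre b (by simp [List.take])
    have hc := hpre c (by simp [List.take])
    have hd := hpre d (by simp [List.take])
    simp [voice_chord_moonlight, voice_chord_moonlight_alt, PySem.List.slice_to,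
      PySem.List.enumerate, PySem.List.pyGetD,
      vcm_step_eq 56 a (by tauto) ha.1 ha.2,
      vcm_step_eq 61 b (by tauto) hb.1 hb.2,
      vcm_step_eq 64 c (by tauto) hc.1 hc.2,
      vcm_step_eq 67 d (by tauto) hd.1 hd.2]
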